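-- pv_equiv track=rewrite | github.com/oasis0981/algorithm | Python/boj/programmers1.py | solution
-- ===== SOURCE A (Python) =====
-- def solution(a, b):
--     dates = 0
--     if a == 1:
--         answer = days[b % 7 - 1]
--     else:
--         for i in range(1, a):
--             dates += date[i-1]
--         answer = days[(dates + b) % 7 - 1]
--     return answer
--
-- days = ('FRI', 'SAT', 'SUN', 'MON', 'TUE', 'WED', 'THU')
--
-- date = (31, 29, 31, 30, 31, 30, 31, 31, 30, 31, 30, 31)
-- ===== SOURCE B (Python) =====
-- DAYS = ('FRI', 'SAT', 'SUN', 'MON', 'TUE', 'WED', 'THU')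
-- # _PREFIX[k] = number of days in 2016 before month k+1 (k = 0..12)
-- _PREFIX = (0, 31, 60, 91, 121, 152, 182, 213, 244, 274, 305, 335, 366)
--
-- def solution(a, b):
--     offset = _PREFIX[a - 1] if a > 1 else 0
--     return DAYS[(offset + b) % 7 - 1]
-- ===== Notes on version B (the rewrite author's own statement) =====
-- stated objective: simpler
-- what changed: Replaces A's per-call loop summing month lengths (and its redundant a==1 branch) with a precomputed module-level prefix-sum table and a single direct lookup.
import Mathlib
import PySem

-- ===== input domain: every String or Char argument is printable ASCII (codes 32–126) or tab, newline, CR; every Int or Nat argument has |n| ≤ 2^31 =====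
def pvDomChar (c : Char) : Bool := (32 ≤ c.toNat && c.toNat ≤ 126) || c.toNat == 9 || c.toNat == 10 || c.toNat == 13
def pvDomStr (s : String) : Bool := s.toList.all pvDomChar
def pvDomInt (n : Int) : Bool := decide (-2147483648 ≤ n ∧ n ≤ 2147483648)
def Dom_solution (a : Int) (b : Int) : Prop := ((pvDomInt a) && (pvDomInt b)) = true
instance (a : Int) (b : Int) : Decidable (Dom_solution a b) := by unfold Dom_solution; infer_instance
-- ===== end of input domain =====

-- B replaces A's per-call summation loop with a precomputed prefix-sum table and a direct lookup (simpler).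

-- ===== PORT A =====
def daysA : List String := ["FRI", "SAT", "SUN", "MON", "TUE", "WED", "THU"]
def dateA : List Int := [31, 29, 31, 30, 31, 30, 31, 31, 30, 31, 30, 31]

-- days[...] index is always in -1..5, so Python never raises there; pyGetD's default "" is unreachable.
-- date[i-1] can raise for a ≥ 14; Pre_solution excludes those inputs, so the default 0 is unreachable on Pre_.
def solution (a : Int) (b : Int) : String :=
  if a == 1 then
    PySem.List.pyGetD daysA (PySem.Int.mod b 7 - 1) ""
  else
    let dates : Int :=
      (PySem.List.pyRange 1 a 1).foldl (fun s i => s + PySem.List.pyGetD dateA (i - 1) 0) 0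
    PySem.List.pyGetD daysA (PySem.Int.mod (dates + b) 7 - 1) ""

-- ===== PORT B =====
def daysB : List String := ["FRI", "SAT", "SUN", "MON", "TUE", "WED", "THU"]
def prefixB : List Int := [0, 31, 60, 91, 121, 152, 182, 213, 244, 274, 305, 335, 366]

def solution_alt (a : Int) (b : Int) : String :=
  let offset : Int := if 1 < a then PySem.List.pyGetD prefixB (a - 1) 0 else 0
  PySem.List.pyGetD daysB (PySem.Int.mod (offset + b) 7 - 1) ""

-- ===== PRECONDITION & SPEC =====
-- A raises IndexError (date[12]) for a ≥ 14; exactly those inputs are excluded.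
def Pre_solution (a : Int) (b : Int) : Prop := a ≤ 13
instance (a : Int) (b : Int) : Decidable (Pre_solution a b) := by unfold Pre_solution; infer_instance
def pvWitness_solution : Int × Int := (5, 24)

def Spec_solution (a : Int) (b : Int) (out : String) : Prop := out = solution_alt a b
instance (a : Int) (b : Int) (out : String) : Decidable (Spec_solution a b out) := by unfold Spec_solution; infer_instance

-- ===== CLAIM =====
def Claim_equal_solution : Prop := ∀ (a : Int) (b : Int), Dom_solution a b → Pre_solution a b → Spec_solution a b (solution a b)

-- ===== LEMMAS AND PROOFS =====
theorem pyRange_empty_of_le (a : Int) (h : a ≤ 1) : PySem.List.pyRange 1 a 1 = [] := by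
  rw [PySem.List.pyRange_one]
  have : (a - 1).toNat = 0 := by omega
  simp [this]

theorem dates_eq_prefix (a : Int) (h2 : 2 ≤ a) (h13 : a ≤ 13) :
    (PySem.List.pyRange 1 a 1).foldl (fun s i => s + PySem.List.pyGetD dateA (i - 1) 0) 0
      = PySem.List.pyGetD prefixB (a - 1) 0 := by
  interval_cases a <;> decide

-- ===== VERDICT =====
theorem solution_spec : Claim_equal_solution := by
  intro a b hd hpre
  unfold Spec_solution solution solution_alt
  by_cases h1 : a ≤ 1
  · rw [pyRange_empty_of_le a h1]
    have : ¬ (1 < a) := by omega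
    simp [this, daysA, daysB]
  · have h2 : 2 ≤ a := by omega
    have hne : (a == 1) = false := by simp; omega
    simp only [hne, Bool.false_eq_true, if_false, if_pos (by omega : 1 < a)]
    rw [dates_eq_prefix a h2 hpre]
    rfl
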